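-- pv_equiv track=rewrite | github.com/DragonBlade1219/Matrix_Learning | shifted_vowels.py | shifted_vowels
-- ===== SOURCE A (Python) =====
-- def shifted_vowels(word: str) -> str:
--
--     vowels = "aeiou"
--     chars_temp = []
--     word = list(word)
--
--     for i in range(len(word)):
--         if word[i] in vowels:
--             if len(chars_temp) == 0:
--                 chars_temp.append(word[i])
--                 first_position = i
--                 continue
--             chars_temp = [word[i]] + chars_temp
--             word[i] = chars_temp.pop()
--         elif len(chars_temp) == 0 and i == len(chars_temp) - 1:
--             return word
--     if  len(chars_temp) != 0:
--         word[first_position] = chars_temp.pop()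
--
--     return ''.join(word)
-- ===== SOURCE B (Python) =====
-- def shifted_vowels(word: str) -> str:
--     # collect vowel positions and the vowels themselves in one scan,
--     # rotate the vowel list right by one, write back, join
--     idxs = []
--     chars = []
--     for i in range(len(word)):
--         c = word[i]
--         if c in "aeiou":
--             idxs.append(i)
--             chars.append(c)
--     if not chars:
--         return word
--     rotated = [chars[-1]] + chars[:-1]
--     out = list(word)
--     for i, c in zip(idxs, rotated):
--         out[i] = c
--     return ''.join(out)
-- ===== Notes on version B (the rewrite author's own statement) =====
-- stated objective: simpler
-- what changed: Replaces A's single interleaved pass with a pop-buffer and deferred first-position fixup by a plain collect-rotate-writeback: record vowel indices and vowels, rotate the vowel list right by one, write each back; no buffer juggling.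
import Mathlib
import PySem

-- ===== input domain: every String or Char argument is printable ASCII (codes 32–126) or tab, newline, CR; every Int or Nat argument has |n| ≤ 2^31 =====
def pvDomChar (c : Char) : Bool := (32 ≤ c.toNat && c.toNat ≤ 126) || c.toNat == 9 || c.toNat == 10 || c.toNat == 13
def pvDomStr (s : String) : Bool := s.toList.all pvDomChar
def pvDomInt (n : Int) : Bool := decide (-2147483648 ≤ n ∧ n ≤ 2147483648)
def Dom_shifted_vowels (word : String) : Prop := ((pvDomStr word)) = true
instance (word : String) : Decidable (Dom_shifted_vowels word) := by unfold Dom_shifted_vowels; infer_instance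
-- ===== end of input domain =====

-- B rotates the lowercase vowels of the word right by one position, like A, by a simpler
-- collect-rotate-writeback decomposition instead of A's interleaved pop-buffer pass.

-- shared helper: Python's `c in "aeiou"` for a single character is char membership
def pvIsVowel (c : Char) : Bool := List.contains ['a', 'e', 'i', 'o', 'u'] c

-- ===== PORT A =====
-- one loop iteration of A (state: mutable char list `w`, buffer `chars_temp`, `first_position`);
-- indices i come from range(len(word)), always in bounds, so Nat indexing via getD is exact
def pvStepA (st : List Char × List Char × Option Nat) (i : Nat) :
    List Char × List Char × Option Nat :=
  match st with
  | (w, ct, fp) =>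
    let c := w.getD i ' '
    if pvIsVowel c then
      if ct.length == 0 then (w, ct ++ [c], some i)
      else
        -- chars_temp = [word[i]] + chars_temp; word[i] = chars_temp.pop()
        let ct2 := c :: ct
        match ct2.getLast? with
        | some last => (w.set i last, ct2.dropLast, fp)
        | none => (w, ct2, fp)  -- unreachable: ct2 is nonempty
    else
      -- A's `elif len(chars_temp)==0 and i == len(chars_temp)-1` requires i = -1: never fires for i ≥ 0
      (w, ct, fp)

def shifted_vowels (word : String) : String :=
  let w0 := word.toList
  match (List.range w0.length).foldl pvStepA (w0, [], none) with
  | (w, ct, fp) =>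
    if ct.length != 0 then
      match fp, ct.getLast? with
      | some p, some last => String.ofList (w.set p last)  -- word[first_position] = chars_temp.pop()
      | _, _ => String.ofList w                            -- unreachable: ct nonempty forces both
    else String.ofList w

-- ===== PORT B =====
def shifted_vowels_alt (word : String) : String :=
  let l := word.toList
  match (List.range l.length).foldl
      (fun (acc : List Nat × List Char) i =>
        let c := l.getD i ' '
        if pvIsVowel c then (acc.1 ++ [i], acc.2 ++ [c]) else acc)
      ([], []) with
  | (idxs, chars) =>
    match chars.getLast? with
    | none => word  -- no vowels: word unchanged
    | some last =>
      let rotated := last :: chars.dropLast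
      String.ofList ((idxs.zip rotated).foldl (fun w pc => w.set pc.1 pc.2) l)

-- ===== PRECONDITION & SPEC =====
def Spec_shifted_vowels (word : String) (out : String) : Prop := out = shifted_vowels_alt word
instance (word : String) (out : String) : Decidable (Spec_shifted_vowels word out) := by unfold Spec_shifted_vowels; infer_instance

-- ===== CLAIM (what is proved, stated in full; the proofs are below) =====
def Claim_equal_shifted_vowels : Prop := ∀ (word : String), Dom_shifted_vowels word → Spec_shifted_vowels word (shifted_vowels word)

-- ===== LEMMAS AND PROOFS =====

def pvVs (l : List Char) (n : Nat) : List (Nat × Char) :=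
  ((List.range n).map (fun i => (i, l.getD i ' '))).filter (fun p => pvIsVowel p.2)

def pvWrite (l : List Char) (ps : List (Nat × Char)) : List Char :=
  ps.foldl (fun w pc => w.set pc.1 pc.2) l

lemma pvVs_fst_lt (l : List Char) (n : Nat) : ∀ p ∈ pvVs l n, p.1 < n := by
  intro p hp
  simp only [pvVs, List.mem_filter, List.mem_map, List.mem_range] at hp
  obtain ⟨⟨i, hi, rfl⟩, -⟩ := hp
  exact hi

lemma pvWrite_getD (l : List Char) (ps : List (Nat × Char)) (i : Nat)
    (h : ∀ p ∈ ps, p.1 ≠ i) : (pvWrite l ps).getD i ' ' = l.getD i ' ' := by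
  induction ps generalizing l with
  | nil => rfl
  | cons p ps ih =>
    rw [pvWrite, List.foldl_cons, ← pvWrite, ih _ (fun q hq => h q (List.mem_cons_of_mem _ hq))]
    simp [List.getD, List.getElem?_set_ne (h p (List.mem_cons_self))]

lemma pvWrite_set_comm (l : List Char) (ps : List (Nat × Char)) (i : Nat) (a : Char)
    (h : ∀ p ∈ ps, p.1 ≠ i) : (pvWrite l ps).set i a = pvWrite (l.set i a) ps := by
  induction ps generalizing l with
  | nil => rfl
  | cons p ps ih =>
    rw [pvWrite, List.foldl_cons, ← pvWrite, ih _ (fun q hq => h q (List.mem_cons_of_mem _ hq)),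
      List.set_comm _ _ (h p List.mem_cons_self)]
    rfl

lemma pvWrite_append (l : List Char) (ps qs : List (Nat × Char)) :
    pvWrite l (ps ++ qs) = pvWrite (pvWrite l ps) qs := by
  simp [pvWrite, List.foldl_append]

lemma pvVs_succ (l : List Char) (n : Nat) :
    pvVs l (n + 1) = pvVs l n ++
      (if pvIsVowel (l.getD n ' ') then [(n, l.getD n ' ')] else []) := by
  simp only [pvVs, List.range_succ, List.map_append, List.filter_append, List.map_cons,
    List.map_nil, List.filter_cons, List.filter_nil]

lemma pvZip_fst_ne (l : List Char) (n : Nat) :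
    ∀ p ∈ (((pvVs l n).map Prod.fst).tail).zip (((pvVs l n).map Prod.snd).dropLast), p.1 ≠ n := by
  intro p hp
  have h2 := List.mem_of_mem_tail (List.of_mem_zip hp).1
  obtain ⟨q, hq, hq2⟩ := List.mem_map.mp h2
  rw [← hq2]
  exact Nat.ne_of_lt (pvVs_fst_lt l n q hq)

lemma invA (l : List Char) (n : Nat) :
    (List.range n).foldl pvStepA (l, [], none) =
      (pvWrite l ((((pvVs l n).map Prod.fst).tail).zip (((pvVs l n).map Prod.snd).dropLast)),
       (((pvVs l n).map Prod.snd).getLast?).toList,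
       ((pvVs l n).map Prod.fst).head?) := by
  induction n with
  | zero => rfl
  | succ n ih =>
    rw [List.range_succ, List.foldl_append, List.foldl_cons, List.foldl_nil, ih, pvVs_succ]
    have hget := pvWrite_getD l _ n (pvZip_fst_ne l n)
    have hget' : (pvWrite l ((((pvVs l n).map Prod.fst).tail).zip
        (((pvVs l n).map Prod.snd).dropLast)))[n]?.getD ' ' = l.getD n ' ' := by
      simpa [List.getD] using hget
    by_cases hv : pvIsVowel (l.getD n ' ') = true
    · have hv3 : pvIsVowel (l[n]?.getD ' ') = true := by simpa [List.getD] using hv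
      rw [if_pos hv]
      rcases hvs : pvVs l n with _ | ⟨⟨i0, c0⟩, rest⟩
      · rw [hvs] at hget'
        simp only [List.map_nil, List.tail_nil, List.dropLast_nil, List.zip_nil_left,
          pvWrite, List.foldl_nil] at hget' ⊢
        simp [pvStepA, hv3]
      · rw [hvs] at hget'
        have hne : (c0 :: List.map Prod.snd rest) ≠ [] := by simp
        have hlast := List.getLast?_eq_some_getLast hne
        have hsplit := List.dropLast_concat_getLast hne
        have hlen : (List.map Prod.fst rest).length = (c0 :: List.map Prod.snd rest).dropLast.length := by
          simp
        have hz : ((List.map Prod.fst rest) ++ [n]).zip (c0 :: List.map Prod.snd rest) =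
            (List.map Prod.fst rest).zip ((c0 :: List.map Prod.snd rest).dropLast) ++
              [(n, (c0 :: List.map Prod.snd rest).getLast hne)] := by
          conv_lhs => rw [← hsplit]
          rw [List.zip_append hlen]
          simp
        simp only [List.map_cons, List.map_append, List.map_nil] at hget' ⊢
        rw [List.dropLast_concat, List.getLast?_concat]
        simp only [List.cons_append, List.tail_cons, List.head?_cons]
        rw [hz, pvWrite_append]
        simp only [pvWrite, List.tail_cons, List.getD] at hget'
        simp [pvStepA, List.getD, hget', hv3, hlast, pvWrite]
    · have hv3 : ¬ pvIsVowel (l[n]?.getD ' ') = true := by simpa [List.getD] using hv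
      rw [if_neg hv]
      simp only [List.append_nil]
      simp only [pvWrite, List.getD] at hget' ⊢
      simp [pvStepA, List.getD, hget', hv3]

lemma invB (l : List Char) (n : Nat) :
    (List.range n).foldl
      (fun (acc : List Nat × List Char) i =>
        let c := l.getD i ' '
        if pvIsVowel c then (acc.1 ++ [i], acc.2 ++ [c]) else acc)
      ([], []) = ((pvVs l n).map Prod.fst, (pvVs l n).map Prod.snd) := by
  induction n with
  | zero => rfl
  | succ n ih =>
    rw [List.range_succ, List.foldl_append, ih, pvVs_succ]
    by_cases hv : pvIsVowel (l.getD n ' ') = true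
    · have hv3 : pvIsVowel (l[n]?.getD ' ') = true := by simpa [List.getD] using hv
      simp [hv3]
    · have hv3 : ¬ pvIsVowel (l[n]?.getD ' ') = true := by simpa [List.getD] using hv
      simp [hv3]

lemma pvVs_pairwise (l : List Char) (n : Nat) :
    (pvVs l n).Pairwise (fun p q => p.1 < q.1) :=
  ((List.pairwise_lt_range).map _ (by intro a b h; exact h)).filter _

lemma pvAgree (word : String) : shifted_vowels word = shifted_vowels_alt word := by
  unfold shifted_vowels shifted_vowels_alt
  simp only [invA, invB]
  rcases hvs : pvVs word.toList word.toList.length with _ | ⟨⟨i0, c0⟩, rest⟩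
  · simp [pvWrite, String.ofList_toList]
  · have hne : (c0 :: List.map Prod.snd rest) ≠ [] := by simp
    have hlast := List.getLast?_eq_some_getLast hne
    have hcomm : (pvWrite word.toList ((List.map Prod.fst rest).zip
          ((c0 :: List.map Prod.snd rest).dropLast))).set i0 ((c0 :: List.map Prod.snd rest).getLast hne)
        = pvWrite (word.toList.set i0 ((c0 :: List.map Prod.snd rest).getLast hne))
            ((List.map Prod.fst rest).zip ((c0 :: List.map Prod.snd rest).dropLast)) := by
      apply pvWrite_set_comm
      intro p hp
      obtain ⟨q, hq, hq2⟩ := List.mem_map.mp (List.of_mem_zip hp).1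
      have hpw := pvVs_pairwise word.toList word.toList.length
      rw [hvs] at hpw
      have := (List.pairwise_cons.mp hpw).1 q hq
      omega
    have hcomm' := congrArg String.ofList hcomm
    simp only [pvWrite] at hcomm'
    simp [hlast, pvWrite, hcomm']

-- ===== VERDICT (by name: the statement is the Claim_ definition above) =====
theorem shifted_vowels_spec : Claim_equal_shifted_vowels := by
  intro word _
  unfold Spec_shifted_vowels
  exact pvAgree word
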